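-- pv_equiv track=rewrite | github.com/jabalpureishan/LeetCode-and-GeeksForGeeks | 1562-people-whose-list-of-favorite-companies-is-not-a-subset-of-another-list/people-whose-list-of-favorite-companies-is-not-a-subset-of-another-list.py | peopleIndexes
-- ===== SOURCE A (Python) =====
-- from typing import List
--
-- def peopleIndexes(favoriteCompanies: List[List[str]]) -> List[int]:
--     subsets,ans,length = set(),[],len(favoriteCompanies)
--     for i in range(length):
--         for j in range(length):
--             if j!=i:
--                 if set(favoriteCompanies[i]).issubset(set(favoriteCompanies[j])):
--                     break
--         else:
--             ans.append(i)
--     return ans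
-- ===== SOURCE B (Python) =====
-- def peopleIndexes(favoriteCompanies):
--     n = len(favoriteCompanies)
--     idx = {}
--     for i, comps in enumerate(favoriteCompanies):
--         for c in comps:
--             idx.setdefault(c, set()).add(i)
--     ans = []
--     for i, comps in enumerate(favoriteCompanies):
--         dom = set(range(n))
--         for c in comps:
--             dom &= idx[c]
--         if len(dom) == 1:
--             ans.append(i)
--     return ans
-- ===== Notes on version B (the rewrite author's own statement) =====
-- stated objective: faster
-- what changed: Replaced the all-pairs subset test with an inverted index mapping each company to the set of people listing it; person i is kept iff the intersection of those index-sets over i's companies is exactly {i}.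
import Mathlib
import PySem

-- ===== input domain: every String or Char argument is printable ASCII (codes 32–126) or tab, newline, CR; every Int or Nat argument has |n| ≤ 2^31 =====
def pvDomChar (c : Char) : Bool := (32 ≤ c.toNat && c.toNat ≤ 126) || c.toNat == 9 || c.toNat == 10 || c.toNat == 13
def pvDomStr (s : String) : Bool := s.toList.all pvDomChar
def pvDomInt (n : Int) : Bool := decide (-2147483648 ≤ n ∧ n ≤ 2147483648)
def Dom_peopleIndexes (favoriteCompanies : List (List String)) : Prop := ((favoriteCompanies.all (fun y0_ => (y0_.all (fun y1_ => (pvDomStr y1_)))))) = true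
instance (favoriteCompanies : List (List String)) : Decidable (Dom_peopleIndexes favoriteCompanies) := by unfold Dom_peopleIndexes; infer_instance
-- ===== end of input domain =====

-- B replaces A's all-pairs subset tests by an inverted index (company -> set of person indices)
-- and keeps person i iff the intersection of the index-sets of i's companies is exactly {i}.

-- ===== PORT A =====
-- the inner 'for j in range(length): … break / else' loop: true = fell through (else-branch runs)
-- (fav[i] / fav[j] are ported with pyGetD; the default [] is never used since i, j come from range(len(fav)))
def pvInnerA (fav : List (List String)) (i : Int) : List Int → Bool
  | [] => true
  | j :: rest =>
      if j ≠ i then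
        if (PySem.Set.ofList (PySem.List.pyGetD fav i [])).issubset
             (PySem.Set.ofList (PySem.List.pyGetD fav j [])) then false
        else pvInnerA fav i rest
      else pvInnerA fav i rest

def peopleIndexes (favoriteCompanies : List (List String)) : List Int :=
  let length : Int := PySem.List.len favoriteCompanies
  (PySem.List.pyRange 0 length).foldl
    (fun ans i =>
      if pvInnerA favoriteCompanies i (PySem.List.pyRange 0 length) then ans ++ [i] else ans)
    []

-- ===== PORT B =====
-- idx.setdefault(c, set()).add(i)  ==  d[c] = d.get(c, set()) ∪ {i}  ==  Dict.modify c ∅ (·.add i)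
def pvIdx (fav : List (List String)) : PySem.Dict String (PySem.Set Int) :=
  (PySem.List.enumerate fav).foldl
    (fun d p => p.2.foldl (fun d c => d.modify c PySem.Set.empty (fun s => s.add p.1)) d)
    PySem.Dict.empty

-- cand = set(range(n)); for c in comps: cand &= idx[c]
-- (idx[c] ported as getD with default ∅; never used since c ∈ comps was inserted while building idx)
def pvCandSet (idx : PySem.Dict String (PySem.Set Int)) (n : Int) (comps : List String) : PySem.Set Int :=
  comps.foldl (fun cand c => cand.inter (idx.getD c PySem.Set.empty))
    (PySem.Set.ofList (PySem.List.pyRange 0 n))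

def peopleIndexes_alt (favoriteCompanies : List (List String)) : List Int :=
  let n : Int := PySem.List.len favoriteCompanies
  let idx := pvIdx favoriteCompanies
  (PySem.List.enumerate favoriteCompanies).foldl
    (fun ans p =>
      if PySem.Set.len (pvCandSet idx n p.2) == 1 then ans ++ [p.1] else ans)
    []

-- ===== PRECONDITION & SPEC =====
def Spec_peopleIndexes (favoriteCompanies : List (List String)) (out : List Int) : Prop := out = peopleIndexes_alt favoriteCompanies
instance (favoriteCompanies : List (List String)) (out : List Int) : Decidable (Spec_peopleIndexes favoriteCompanies out) := by unfold Spec_peopleIndexes; infer_instance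

-- ===== CLAIM (what is proved, stated in full; the proofs are below) =====
def Claim_equal_peopleIndexes : Prop := ∀ (favoriteCompanies : List (List String)), Dom_peopleIndexes favoriteCompanies → Spec_peopleIndexes favoriteCompanies (peopleIndexes favoriteCompanies)

-- ===== LEMMAS AND PROOFS =====

-- membership in the inverted index after the inner (per-person) build loop
theorem pvIdx_inner_mem (cs : List String) (d : PySem.Dict String (PySem.Set Int))
    (i : Int) (c : String) (j : Int) :
    j ∈ (cs.foldl (fun d c' => d.modify c' PySem.Set.empty (fun s => s.add i)) d).getD c PySem.Set.empty
      ↔ j ∈ d.getD c PySem.Set.empty ∨ (c ∈ cs ∧ j = i) := by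
  induction cs generalizing d with
  | nil => simp
  | cons c' cs ih =>
    simp only [List.foldl_cons, ih, PySem.Dict.getD_modify, List.mem_cons]
    by_cases h : c = c'
    · subst h; simp [PySem.Set.mem_add]; tauto
    · simp [h]

-- membership in the inverted index after the outer build loop
theorem pvIdx_outer_mem (ps : List (Int × List String)) (d : PySem.Dict String (PySem.Set Int))
    (c : String) (j : Int) :
    j ∈ (ps.foldl (fun d p => p.2.foldl (fun d c' => d.modify c' PySem.Set.empty (fun s => s.add p.1)) d) d).getD c PySem.Set.empty
      ↔ j ∈ d.getD c PySem.Set.empty ∨ ∃ p ∈ ps, c ∈ p.2 ∧ j = p.1 := by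
  induction ps generalizing d with
  | nil => simp
  | cons p ps ih =>
    simp only [List.foldl_cons, ih, pvIdx_inner_mem, List.mem_cons]
    constructor
    · rintro ((h | ⟨hc, hj⟩) | ⟨q, hq, hcq, hjq⟩)
      · exact Or.inl h
      · exact Or.inr ⟨p, Or.inl rfl, hc, hj⟩
      · exact Or.inr ⟨q, Or.inr hq, hcq, hjq⟩
    · rintro (h | ⟨q, (rfl | hq), hcq, hjq⟩)
      · exact Or.inl (Or.inl h)
      · exact Or.inl (Or.inr ⟨hcq, hjq⟩)
      · exact Or.inr ⟨q, hq, hcq, hjq⟩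

theorem pvIdx_mem (fav : List (List String)) (c : String) (j : Int) :
    j ∈ (pvIdx fav).getD c PySem.Set.empty
      ↔ ∃ k : Nat, k < fav.length ∧ (j : Int) = k ∧ c ∈ fav.getD k [] := by
  unfold pvIdx
  rw [pvIdx_outer_mem]
  simp only [PySem.Dict.getD_empty, PySem.Set.empty, List.not_mem_nil, false_or]
  constructor
  · rintro ⟨p, hp, hcp, hjp⟩
    obtain ⟨k, hk, rfl⟩ := (PySem.List.mem_enumerate_iff fav 0 p).mp hp
    refine ⟨k, hk, by simpa using hjp, ?_⟩
    rwa [List.getD_eq_getElem fav [] hk]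
  · rintro ⟨k, hk, hj, hc⟩
    refine ⟨((k : Int), fav[k]), (PySem.List.mem_enumerate_iff fav 0 _).mpr ⟨k, hk, by simp⟩, ?_, by simpa using hj⟩
    rwa [List.getD_eq_getElem fav [] hk] at hc

-- membership in the intersection fold
theorem pvInter_fold_mem (cs : List String) (g : String → PySem.Set Int) (s : PySem.Set Int) (j : Int) :
    j ∈ cs.foldl (fun s c => s.inter (g c)) s ↔ j ∈ s ∧ ∀ c ∈ cs, j ∈ g c := by
  induction cs generalizing s with
  | nil => simp
  | cons c cs ih =>
    simp only [List.foldl_cons, ih, PySem.Set.mem_inter, List.mem_cons]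
    constructor
    · rintro ⟨⟨hs, hc⟩, hall⟩
      exact ⟨hs, fun c' hc' => hc'.elim (fun h => h ▸ hc) (hall c')⟩
    · rintro ⟨hs, hall⟩
      exact ⟨⟨hs, hall c (Or.inl rfl)⟩, fun c' hc' => hall c' (Or.inr hc')⟩

theorem pvInter_fold_nodup (cs : List String) (g : String → PySem.Set Int) (s : PySem.Set Int)
    (hs : s.Nodup) : (cs.foldl (fun s c => s.inter (g c)) s).Nodup := by
  induction cs generalizing s with
  | nil => exact hs
  | cons c cs ih => exact ih _ (PySem.Set.nodup_inter _ _ hs)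

-- a nodup list containing i has length 1 iff every element is i
theorem pvLen_one_iff (l : List Int) (i : Int) (hnd : l.Nodup) (hi : i ∈ l) :
    l.length = 1 ↔ ∀ j ∈ l, j = i := by
  constructor
  · intro h j hj
    match l, h with
    | [x], _ =>
      simp at hi hj; omega
  · intro h
    match l, hnd, hi with
    | [x], _, _ => rfl
    | x :: y :: t, hnd, _ =>
      exfalso
      have hx := h x (by simp)
      have hy := h y (by simp)
      simp at hnd
      omega

-- the inner loop of A: true iff no j in js dominates i
theorem pvInnerA_iff (fav : List (List String)) (i : Int) (js : List Int) :
    pvInnerA fav i js = true ↔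
      ∀ j ∈ js, ¬(j ≠ i ∧
        (PySem.Set.ofList (PySem.List.pyGetD fav i [])).issubset
            (PySem.Set.ofList (PySem.List.pyGetD fav j [])) = true) := by
  induction js with
  | nil => simp [pvInnerA]
  | cons j js ih =>
    simp only [pvInnerA]
    split_ifs with h1 h2
    · constructor
      · intro h; cases h
      · intro h; exact absurd ⟨h1, h2⟩ (h j (List.mem_cons_self))
    · rw [ih]
      constructor
      · intro h j' hj'
        rcases List.mem_cons.mp hj' with rfl | hm
        · exact fun hc => h2 hc.2
        · exact h j' hm
      · intro h j' hj'
        exact h j' (List.mem_cons_of_mem _ hj')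
    · rw [ih]
      constructor
      · intro h j' hj'
        rcases List.mem_cons.mp hj' with rfl | hm
        · exact fun hc => h1 hc.1
        · exact h j' hm
      · intro h j' hj'
        exact h j' (List.mem_cons_of_mem _ hj')

-- the per-person predicates of A and B agree on indices in range
theorem pvPred_eq (fav : List (List String)) (k : Nat) (hk : k < fav.length) :
    (PySem.Set.len (pvCandSet (pvIdx fav) (PySem.List.len fav) (PySem.List.pyGetD fav (k : Int) [])) == 1)
      = pvInnerA fav (k : Int) (PySem.List.pyRange 0 (PySem.List.len fav)) := by
  have hlen : PySem.List.len fav = (fav.length : Int) := rfl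
  set cs := PySem.List.pyGetD fav (k : Int) [] with hcs
  set cand := pvCandSet (pvIdx fav) (PySem.List.len fav) cs with hcand
  have hmem : ∀ j : Int, j ∈ cand ↔
      (0 ≤ j ∧ j < (fav.length : Int)) ∧ ∀ c ∈ cs, c ∈ PySem.List.pyGetD fav j [] := by
    intro j
    rw [hcand]
    unfold pvCandSet
    rw [pvInter_fold_mem]
    simp only [PySem.Set.mem_ofList, PySem.List.mem_pyRange_one, hlen, pvIdx_mem]
    constructor
    · rintro ⟨⟨h0, hn⟩, hall⟩
      refine ⟨⟨h0, hn⟩, fun c hc => ?_⟩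
      obtain ⟨m, hm, hjm, hcm⟩ := hall c hc
      rw [hjm, PySem.List.pyGetD_natCast]
      exact hcm
    · rintro ⟨⟨h0, hn⟩, hall⟩
      refine ⟨⟨h0, hn⟩, fun c hc => ?_⟩
      refine ⟨j.toNat, by omega, by omega, ?_⟩
      have hjt : j = (j.toNat : Int) := by omega
      have := hall c hc
      rwa [hjt, PySem.List.pyGetD_natCast] at this
  have hnd : cand.Nodup := by
    rw [hcand]; unfold pvCandSet
    exact pvInter_fold_nodup _ _ _ (PySem.Set.nodup_ofList _)
  have hkmem : ((k : Int)) ∈ cand := by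
    rw [hmem]
    exact ⟨⟨by positivity, by exact_mod_cast hk⟩, fun c hc => hc⟩
  rw [Bool.eq_iff_iff, beq_iff_eq, pvInnerA_iff]
  have hlen1 : PySem.Set.len cand = 1 ↔ cand.length = 1 := by
    unfold PySem.Set.len; omega
  rw [hlen1, pvLen_one_iff cand (k : Int) hnd hkmem]
  constructor
  · intro h j hjr hc
    obtain ⟨hne, hsub⟩ := hc
    have hsub' : ∀ c ∈ cs, c ∈ PySem.List.pyGetD fav j [] := by
      intro c hc'
      exact (PySem.Set.mem_ofList _ _).mp
        ((PySem.Set.issubset_iff _ _).mp hsub c ((PySem.Set.mem_ofList _ _).mpr hc'))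
    have hjb := (PySem.List.mem_pyRange_one.mp hjr)
    rw [hlen] at hjb
    exact hne (h j ((hmem j).mpr ⟨hjb, hsub'⟩))
  · intro h j hj
    by_contra hne
    have hj' := (hmem j).mp hj
    refine h j ?_ ⟨hne, ?_⟩
    · rw [PySem.List.mem_pyRange_one, hlen]; exact hj'.1
    · rw [PySem.Set.issubset_iff]
      intro c hc
      rw [PySem.Set.mem_ofList] at hc ⊢
      exact hj'.2 c hc

-- ===== VERDICT (by name: the statement is the Claim_ definition above) =====
theorem peopleIndexes_spec : Claim_equal_peopleIndexes := by
  unfold Claim_equal_peopleIndexes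
  intro fav _
  show peopleIndexes fav = peopleIndexes_alt fav
  unfold peopleIndexes peopleIndexes_alt
  simp only []
  rw [PySem.List.foldl_append_if_eq_filter,
      PySem.List.foldl_append_if
        (p := fun p : Int × List String =>
          PySem.Set.len (pvCandSet (pvIdx fav) (PySem.List.len fav) p.2) == 1)
        (f := fun p : Int × List String => p.1),
      PySem.List.enumerate_eq_map_pyRange fav [], List.filter_map, List.map_map]
  simp only [List.nil_append, Function.comp_def]
  rw [List.map_id']
  apply List.filter_congr
  intro i hi
  have hib := PySem.List.mem_pyRange_one.mp hi
  have hlen : PySem.List.len fav = (fav.length : Int) := rfl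
  rw [hlen] at hib
  have hit : i = ((i.toNat : Nat) : Int) := by omega
  have hk : i.toNat < fav.length := by omega
  rw [hit, pvPred_eq fav i.toNat hk]
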